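-- pv_equiv track=rewrite | github.com/adamlew52/encrypt-lvl1 | Decrypt.py | Decrypt3
-- ===== SOURCE A (Python) =====
-- def Decrypt3(password):
--     firstHalf = ''
--     secondHalf = ''
--     decrypt3 = ''
--     passwordLength = len(password)
--
--     for i in range(0, passwordLength):
--         if i <= len(password)//2-1:
--             firstHalf = firstHalf + password[i]
--         else:
--             secondHalf = secondHalf + password[i]
--
--     decrypt3 += secondHalf
--     decrypt3 += firstHalf
--
--     return decrypt3
-- ===== SOURCE B (Python) =====
-- def Decrypt3(password):
--     half = len(password) // 2
--     return password[half:] + password[:half]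
-- ===== Notes on version B (the rewrite author's own statement) =====
-- stated objective: simpler
-- what changed: Replaces the per-character loop with branch-and-concatenate by a single closed-form slice expression password[half:] + password[:half].
import Mathlib
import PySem

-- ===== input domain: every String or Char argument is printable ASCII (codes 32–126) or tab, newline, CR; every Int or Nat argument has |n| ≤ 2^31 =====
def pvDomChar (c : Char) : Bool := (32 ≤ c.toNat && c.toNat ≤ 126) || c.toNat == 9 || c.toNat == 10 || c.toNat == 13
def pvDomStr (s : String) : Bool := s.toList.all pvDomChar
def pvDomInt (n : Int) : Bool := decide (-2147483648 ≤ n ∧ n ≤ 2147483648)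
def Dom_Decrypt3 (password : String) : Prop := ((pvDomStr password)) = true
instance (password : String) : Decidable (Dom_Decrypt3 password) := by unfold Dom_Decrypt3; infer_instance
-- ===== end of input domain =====

-- B replaces A's per-character loop (append to firstHalf or secondHalf by an index test)
-- with a single closed-form slice expression; equal return value on all inputs (objective: simpler).

-- ===== PORT A =====
def Decrypt3 (password : String) : String :=
  let cs := password.toList
  let passwordLength : Int := cs.length
  let p := (PySem.List.pyRange 0 passwordLength 1).foldl
    (fun (st : List Char × List Char) i =>
      if i ≤ PySem.Int.floordiv (cs.length : Int) 2 - 1 then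
        (st.1 ++ [PySem.List.pyGetD cs i ' '], st.2)
      else
        (st.1, st.2 ++ [PySem.List.pyGetD cs i ' ']))
    ([], [])
  String.mk (([] ++ p.2) ++ p.1)

-- ===== PORT B =====
def Decrypt3_alt (password : String) : String :=
  let cs := password.toList
  let half := PySem.Int.floordiv (cs.length : Int) 2
  String.mk (PySem.List.slice cs (some half) none ++ PySem.List.slice cs none (some half))

-- ===== PRECONDITION & SPEC =====
def Spec_Decrypt3 (password : String) (out : String) : Prop := out = Decrypt3_alt password
instance (password : String) (out : String) : Decidable (Spec_Decrypt3 password out) := by unfold Spec_Decrypt3; infer_instance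

-- ===== CLAIM (what is proved, stated in full; the proofs are below) =====
def Claim_equal_Decrypt3 : Prop := ∀ (password : String), Dom_Decrypt3 password → Spec_Decrypt3 password (Decrypt3 password)

-- ===== LEMMAS AND PROOFS =====

-- Loop invariant: after processing indices 0..m-1, the accumulator holds
-- (the first min m h characters, the next m - h characters) where h = len/2.
theorem Decrypt3_fold_inv (cs : List Char) (m : Nat) (hm : m ≤ cs.length) :
    ((List.range m).map (Int.ofNat)).foldl
      (fun (st : List Char × List Char) i =>
        if i ≤ PySem.Int.floordiv (cs.length : Int) 2 - 1 then
          (st.1 ++ [PySem.List.pyGetD cs i ' '], st.2)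
        else
          (st.1, st.2 ++ [PySem.List.pyGetD cs i ' ']))
      ([], [])
    = (cs.take (min m (cs.length / 2)), (cs.drop (cs.length / 2)).take (m - cs.length / 2)) := by
  induction m with
  | zero => simp
  | succ k ih =>
    have hk : k ≤ cs.length := Nat.le_of_succ_le hm
    rw [List.range_succ, List.map_append, List.foldl_append, ih hk]
    have hget : PySem.List.pyGetD cs (Int.ofNat k) ' ' = cs.getD k ' ' := by
      simp [PySem.List.pyGetD_natCast cs k ' ']
    have hfd : PySem.Int.floordiv (cs.length : Int) 2 = ((cs.length / 2 : Nat) : Int) :=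
      PySem.Int.floordiv_natCast cs.length 2
    have hk' : k < cs.length := hm
    simp only [List.map_cons, List.map_nil, List.foldl_cons, List.foldl_nil, hget, hfd]
    by_cases hlt : k < cs.length / 2
    · rw [if_pos (by simp only [Int.ofNat_eq_natCast]; push_cast; omega)]
      have h1 : min k (cs.length / 2) = k := Nat.min_eq_left (Nat.le_of_lt hlt)
      have h2 : min (k + 1) (cs.length / 2) = k + 1 := Nat.min_eq_left hlt
      have h3 : k - cs.length / 2 = 0 := Nat.sub_eq_zero_of_le (Nat.le_of_lt hlt)
      have h4 : k + 1 - cs.length / 2 = 0 := Nat.sub_eq_zero_of_le hlt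
      have htake : cs.take k ++ [cs.getD k ' '] = cs.take (k + 1) := by
        rw [List.getD_eq_getElem cs ' ' hk']
        exact (List.take_succ_eq_append_getElem hk').symm
      rw [h1, h2, h3, h4, htake]
    · rw [if_neg (by simp only [Int.ofNat_eq_natCast]; push_cast; omega)]
      have hge : cs.length / 2 ≤ k := Nat.not_lt.mp hlt
      have h1 : min k (cs.length / 2) = cs.length / 2 := Nat.min_eq_right hge
      have h2 : min (k + 1) (cs.length / 2) = cs.length / 2 :=
        Nat.min_eq_right (Nat.le_succ_of_le hge)
      have htake : (cs.drop (cs.length / 2)).take (k - cs.length / 2) ++ [cs.getD k ' ']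
          = (cs.drop (cs.length / 2)).take (k + 1 - cs.length / 2) := by
        have hlen : k - cs.length / 2 < (cs.drop (cs.length / 2)).length := by
          simp only [List.length_drop]; omega
        rw [List.getD_eq_getElem cs ' ' hk',
            show k + 1 - cs.length / 2 = (k - cs.length / 2) + 1 from by omega,
            List.take_succ_eq_append_getElem hlen, List.getElem_drop]
        have hidx : cs.length / 2 + (k - cs.length / 2) = k := by omega
        simp [hidx]
      rw [h1, h2, htake]

-- ===== VERDICT (by name: the statement is the Claim_ definition above) =====
theorem Decrypt3_spec : Claim_equal_Decrypt3 := by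
  intro password _
  unfold Spec_Decrypt3 Decrypt3 Decrypt3_alt
  dsimp only
  set cs := password.toList with hcs
  have hrange : PySem.List.pyRange 0 (cs.length : Int) 1 = (List.range cs.length).map Int.ofNat := by
    simpa using PySem.List.pyRange_zero_natCast cs.length
  rw [hrange, Decrypt3_fold_inv cs cs.length le_rfl]
  have hfd : PySem.Int.floordiv (cs.length : Int) 2 = ((cs.length / 2 : Nat) : Int) :=
    PySem.Int.floordiv_natCast cs.length 2
  rw [hfd, PySem.List.slice_from_natCast, PySem.List.slice_to_natCast]
  have hdrop : (cs.drop (cs.length / 2)).take (cs.length - cs.length / 2)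
      = cs.drop (cs.length / 2) :=
    List.take_of_length_le (by rw [List.length_drop])
  simp [Nat.min_eq_right (Nat.div_le_self _ _), hdrop]
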